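-- pv_equiv track=rewrite | github.com/vishnu2981997/Programming_Ques | PROG QUES/1.py | count_of_binary_1s
-- ===== SOURCE A (Python) =====
-- def count_of_binary_1s(arr):
--     """
--     :param arr: Array returned by convert_to_file_size()
--     :return: An integer array consisting of count of no.of 1's in array's binary representation
--     """
--     arr1 = []
--     for num in arr:
--         if num == 0:
--             arr1.append(0)
--         else:
--             binary = bin(int(num))
--             arr1.append(binary[2:len(binary)].count("1"))
--     return arr1
-- ===== SOURCE B (Python) =====
-- def count_of_binary_1s(arr):
--     result = []
--     for num in arr:
--         n = abs(int(num))
--         count = 0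
--         while n:
--             count += n & 1
--             n >>= 1
--         result.append(count)
--     return result
-- ===== Notes on version B (the rewrite author's own statement) =====
-- stated objective: alternative
-- what changed: Replaces the binary-string construction and substring '1'-count with an arithmetic shift-and-mask popcount loop on abs(num), no string formation at all.
import Mathlib
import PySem

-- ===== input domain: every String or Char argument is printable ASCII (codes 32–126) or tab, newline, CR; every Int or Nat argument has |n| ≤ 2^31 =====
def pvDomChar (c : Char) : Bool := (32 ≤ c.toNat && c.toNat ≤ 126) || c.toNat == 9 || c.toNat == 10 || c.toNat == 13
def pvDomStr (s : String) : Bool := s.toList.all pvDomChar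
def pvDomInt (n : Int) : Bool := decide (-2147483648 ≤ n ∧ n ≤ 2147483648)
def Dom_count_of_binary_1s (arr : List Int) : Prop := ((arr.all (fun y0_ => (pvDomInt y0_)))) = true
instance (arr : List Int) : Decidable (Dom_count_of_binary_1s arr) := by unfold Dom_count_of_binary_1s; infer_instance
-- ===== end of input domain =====

-- B replaces A's binary-string build + substring count of '1' with an arithmetic
-- shift-and-mask popcount loop on |num| (alternative decomposition, same cost).


-- ===== PORT A =====
-- hand port of Python's bin(n) digit part (no PySem primitive): MSB-first binary
-- digits of a positive Nat; bin(n) = "0b" ++ digits (or "-0b" ++ digits of |n|).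
def pyBinDigits : Nat → List Char
  | 0 => []
  | n+1 => pyBinDigits ((n+1)/2) ++ [if (n+1) % 2 = 1 then '1' else '0']
decreasing_by exact Nat.div_lt_self (Nat.succ_pos n) (by norm_num)

-- binary[2:len(binary)] on a List Char is exactly List.drop 2; .count "1" is List.count '1'.
def count_of_binary_1s (arr : List Int) : List Int :=
  arr.foldl (fun arr1 num =>
    if num == 0 then arr1 ++ [(0 : Int)]
    else
      let binary : List Char :=
        (if num < 0 then ['-','0','b'] else ['0','b']) ++ pyBinDigits num.natAbs
      arr1 ++ [((binary.drop 2).count '1' : Int)]) []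

-- ===== PORT B =====
-- while n: count += n & 1; n >>= 1
def popLoop : Nat → Nat → Nat
  | 0, count => count
  | n+1, count => popLoop ((n+1) >>> 1) (count + ((n+1) &&& 1))
decreasing_by simpa [Nat.shiftRight_one] using Nat.div_lt_self (Nat.succ_pos n) (by norm_num)

def count_of_binary_1s_alt (arr : List Int) : List Int :=
  arr.foldl (fun result num => result ++ [(popLoop num.natAbs 0 : Int)]) []

-- ===== PRECONDITION & SPEC =====
def Spec_count_of_binary_1s (arr : List Int) (out : List Int) : Prop := out = count_of_binary_1s_alt arr
instance (arr : List Int) (out : List Int) : Decidable (Spec_count_of_binary_1s arr out) := by unfold Spec_count_of_binary_1s; infer_instance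

-- ===== CLAIM (what is proved, stated in full; the proofs are below) =====
def Claim_equal_count_of_binary_1s : Prop := ∀ (arr : List Int), Dom_count_of_binary_1s arr → Spec_count_of_binary_1s arr (count_of_binary_1s arr)

-- ===== LEMMAS AND PROOFS =====
theorem popLoop_eq_count (n : Nat) : ∀ c, popLoop n c = c + (pyBinDigits n).count '1' := by
  induction n using Nat.strong_induction_on with
  | _ n ih =>
    intro c
    match n with
    | 0 => simp [popLoop, pyBinDigits]
    | m+1 =>
      rw [popLoop, pyBinDigits,
        ih ((m+1) >>> 1) (by simpa [Nat.shiftRight_one] using Nat.div_lt_self (Nat.succ_pos m) (by norm_num))]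
      have h2 : (m+1) % 2 = 0 ∨ (m+1) % 2 = 1 := Nat.mod_two_eq_zero_or_one _
      rcases h2 with h | h <;>
        simp [Nat.shiftRight_one, Nat.and_one_is_mod, h, List.count_append] <;> omega

theorem elem_eq (num : Int) (acc : List Int) :
    (if num == 0 then acc ++ [(0 : Int)]
     else
      let binary : List Char :=
        (if num < 0 then ['-','0','b'] else ['0','b']) ++ pyBinDigits num.natAbs
      acc ++ [((binary.drop 2).count '1' : Int)]) = acc ++ [(popLoop num.natAbs 0 : Int)] := by
  by_cases h0 : num = 0
  · simp [h0, popLoop, pyBinDigits]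
  · rw [popLoop_eq_count]
    by_cases hn : num < 0 <;> simp [h0, hn]

theorem foldlA_eq (arr : List Int) : ∀ (acc : List Int),
    arr.foldl (fun arr1 num =>
      if num == 0 then arr1 ++ [(0 : Int)]
      else
        let binary : List Char :=
          (if num < 0 then ['-','0','b'] else ['0','b']) ++ pyBinDigits num.natAbs
        arr1 ++ [((binary.drop 2).count '1' : Int)]) acc
    = acc ++ arr.map (fun num => (popLoop num.natAbs 0 : Int)) := by
  induction arr with
  | nil => simp
  | cons x xs ih =>
    intro acc
    rw [List.foldl_cons, elem_eq x acc, ih]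
    simp

theorem foldlB_eq (arr : List Int) : ∀ (acc : List Int),
    arr.foldl (fun result num => result ++ [(popLoop num.natAbs 0 : Int)]) acc
    = acc ++ arr.map (fun num => (popLoop num.natAbs 0 : Int)) := by
  induction arr with
  | nil => simp
  | cons x xs ih => intro acc; rw [List.foldl_cons, ih]; simp

theorem count_of_binary_1s_eq (arr : List Int) :
    count_of_binary_1s arr = count_of_binary_1s_alt arr := by
  unfold count_of_binary_1s count_of_binary_1s_alt
  rw [foldlA_eq, foldlB_eq]

-- ===== VERDICT (by name: the statement is the Claim_ definition above) =====
theorem count_of_binary_1s_spec : Claim_equal_count_of_binary_1s := by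
  intro arr _
  unfold Spec_count_of_binary_1s
  exact count_of_binary_1s_eq arr
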